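-- pv_equiv track=rewrite | github.com/TanelPaal/Programming-Introductory-Course | OP/op06_air_traffic_planning/air_traffic_planning.py | busiest_time
-- ===== SOURCE A (Python) =====
-- def busiest_time(schedule: dict[str, tuple[str, str]]) -> list[str]:
--     """
--     Find the busiest hour(s) at the airport based on the flight schedule.
--
--     Finds the busiest hour(s) at the airport based on the flight schedule. The busiest hour(s)
--     is/are determined by counting the number of flights departing in each hour of the day.
--     All flights departing with the same hour in their departure time, are counted into the same hour.
--
--     The function returns a list of strings of the busiest hours, sorted in ascending order, such as ["08", "21"].
--
--     :param schedule: Dictionary containing the flight schedule, where keys are departure times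
--                      in the format "HH:mm" and values are tuples containing destination and flight number.
--     :return: List of strings representing the busiest hour(s) in 24-hour format, such as ["08", "21"].
--     """
--     # Create a dict to count the number of flights for each hour.
--     hour_counts = {}
--
--     for departure_time in schedule.keys():
--         hour, minutes = departure_time.split(':')
--         if hour in hour_counts:
--             hour_counts[hour] += 1
--         else:
--             hour_counts[hour] = 1
--
--     # Find the max flight count.
--     max_flight_count = max(hour_counts.values())
--
--     # Create a list of hours with the maximum flight count.
--     busiest_hours = [hour for hour, count in hour_counts.items() if count == max_flight_count]
--
--     # Sort the busiest hours in ascending order.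
--     busiest_hours.sort()
--
--     return busiest_hours
-- ===== SOURCE B (Python) =====
-- def busiest_time(schedule: dict[str, tuple[str, str]]) -> list[str]:
--     """Sort the hours, then one run-length scan over the sorted list yields the busiest hour(s) already in order."""
--     hours = sorted(hour for hour, _minutes in (t.split(':') for t in schedule))
--     runs = []  # run-length encoding of the sorted hour list: [hour, count] pairs, hours ascending
--     for h in hours:
--         if runs and runs[-1][0] == h:
--             runs[-1][1] += 1
--         else:
--             runs.append([h, 1])
--     max_count = max(count for _, count in runs)
--     return [hour for hour, count in runs if count == max_count]
-- ===== Notes on version B (the rewrite author's own statement) =====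
-- stated objective: alternative
-- what changed: Replaces A's counting dict plus final sort by sort-first-then-run-length-scan: the hours are sorted up front, one scan run-length-encodes the sorted list, and the busiest hours are read off the runs already in ascending order, so no counting table and no final sort exist.
import Mathlib
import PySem

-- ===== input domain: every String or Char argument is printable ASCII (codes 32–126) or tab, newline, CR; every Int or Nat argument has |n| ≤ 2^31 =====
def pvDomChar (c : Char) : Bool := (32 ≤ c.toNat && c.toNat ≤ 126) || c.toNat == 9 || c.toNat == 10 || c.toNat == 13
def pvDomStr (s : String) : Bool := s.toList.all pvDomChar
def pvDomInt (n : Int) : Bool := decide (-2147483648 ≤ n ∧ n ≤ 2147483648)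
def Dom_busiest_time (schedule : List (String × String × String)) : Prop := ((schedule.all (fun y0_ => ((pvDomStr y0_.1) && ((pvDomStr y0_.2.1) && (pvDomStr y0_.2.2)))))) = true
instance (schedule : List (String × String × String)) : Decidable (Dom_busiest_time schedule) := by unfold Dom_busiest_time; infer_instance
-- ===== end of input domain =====

-- B replaces A's counting dict + final sort by sort-first + one run-length scan; same cost class,
-- the equivalence is about the RETURN value (neither version mutates its argument).

-- shared helper: the hour of "hour, minutes = departure_time.split(':')" (minutes unused in both
-- Pythons) — exact whenever the unpack succeeds, i.e. the key has exactly one ':' (ensured by Pre_)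
def pvHour (s : String) : String := ((PySem.Str.split? s ":").getD []).headD ""

-- ===== PORT A =====
-- for departure_time in schedule.keys(): hour, minutes = departure_time.split(':')  (minutes unused);
-- hour_counts[hour] += 1 transliterated as insert hour (getD hour 0 + 1) — exact when hour is present, which the contains-guard ensures
def busiest_time (schedule : List (String × String × String)) : List String :=
  let hour_counts : PySem.Dict String Int :=
    schedule.foldl (fun d kv =>
      let hour := pvHour kv.1
      if d.contains hour then d.insert hour (d.getD hour 0 + 1)
      else d.insert hour 1) PySem.Dict.empty
  let max_flight_count := (PySem.List.max? hour_counts.values (fun v => v)).getD 0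
  let busiest_hours := (hour_counts.items.filter (fun p => p.2 == max_flight_count)).map (fun p => p.1)
  PySem.List.sorted busiest_hours (fun x => x) false

-- ===== PORT B =====
-- loop body of B: if runs and runs[-1][0] == h: runs[-1][1] += 1 else: runs.append([h, 1])
def pvStep (runs : List (String × Int)) (h : String) : List (String × Int) :=
  match runs.getLast? with
  | some last => if last.1 == h then runs.dropLast ++ [(last.1, last.2 + 1)] else runs ++ [(h, 1)]
  | none => runs ++ [(h, 1)]

def busiest_time_alt (schedule : List (String × String × String)) : List String :=
  let hours := PySem.List.sorted (schedule.map (fun kv => pvHour kv.1)) (fun x => x) false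
  let runs := hours.foldl pvStep []
  let max_count := (PySem.List.max? (runs.map (fun p => p.2)) (fun v => v)).getD 0
  (runs.filter (fun p => p.2 == max_count)).map (fun p => p.1)

-- ===== PRECONDITION & SPEC =====
-- Pre_ excludes empty schedules (both Pythons raise ValueError from max()) and keys whose ':'-count
-- is not 1 (both Pythons raise ValueError unpacking the split), and lists with duplicate keys, which
-- are unrepresentable in A's dict parameter (a dict collapses duplicates, an association list counts them twice).
def Pre_busiest_time (schedule : List (String × String × String)) : Prop :=
  schedule ≠ [] ∧ (∀ kv ∈ schedule, PySem.Str.count kv.1 ":" = 1) ∧ (schedule.map (fun kv => kv.1)).Nodup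
instance (schedule : List (String × String × String)) : Decidable (Pre_busiest_time schedule) := by
  unfold Pre_busiest_time; infer_instance
def pvWitness_busiest_time : (List (String × String × String)) :=
  [("08:10", "AAA", "F1"), ("08:30", "BBB", "F2"), ("21:00", "CCC", "F3")]
def Spec_busiest_time (schedule : List (String × String × String)) (out : List String) : Prop := out = busiest_time_alt schedule
instance (schedule : List (String × String × String)) (out : List String) : Decidable (Spec_busiest_time schedule out) := by unfold Spec_busiest_time; infer_instance

-- ===== CLAIM (what is proved, stated in full; the proofs are below) =====
def Claim_equal_busiest_time : Prop := ∀ (schedule : List (String × String × String)), Dom_busiest_time schedule → Pre_busiest_time schedule → Spec_busiest_time schedule (busiest_time schedule)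

-- ===== LEMMAS AND PROOFS =====

theorem pv_getD_zero_of_not_contains (d : PySem.Dict String Int) (x : String)
    (h : d.contains x = false) : d.getD x 0 = 0 := by
  have h2 : d.get? x = none := by rw [PySem.Dict.get?_eq_none_iff_contains]; simp [h]
  simp [PySem.Dict.getD, h2]

theorem pv_fold_branch {f g : PySem.Dict String Int → String → PySem.Dict String Int}
    (hb : ∀ d x, f d x = g d x) (l : List (String × String × String))
    (d : PySem.Dict String Int) :
    l.foldl (fun d kv => f d (pvHour kv.1)) d = l.foldl (fun d kv => g d (pvHour kv.1)) d := by
  induction l generalizing d with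
  | nil => rfl
  | cons kv t ih => rw [List.foldl_cons, List.foldl_cons, hb]; exact ih _

-- A's counting loop builds exactly Counter(hours)
theorem pv_counts_eq (schedule : List (String × String × String)) :
    schedule.foldl (fun d kv =>
      let hour := pvHour kv.1
      if d.contains hour then d.insert hour (d.getD hour 0 + 1)
      else d.insert hour 1) PySem.Dict.empty
    = PySem.Dict.counter (schedule.map (fun kv => pvHour kv.1)) := by
  have hb : ∀ (d : PySem.Dict String Int) (x : String),
      (if d.contains x then d.insert x (d.getD x 0 + 1) else d.insert x 1)
      = d.insert x (d.getD x 0 + 1) := by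
    intro d x
    by_cases h : d.contains x
    · simp [h]
    · have h0 : d.getD x 0 = 0 := pv_getD_zero_of_not_contains d x (by simpa using h)
      simp [h, h0]
  rw [← PySem.Dict.foldl_insert_getD_add_one_eq_counter, List.foldl_map]
  exact pv_fold_branch hb schedule PySem.Dict.empty

-- max() over a permuted list of values is unchanged
theorem pv_max_perm (l l' : List Int) (hp : l.Perm l') :
    (PySem.List.max? l (fun v => v)).getD 0 = (PySem.List.max? l' (fun v => v)).getD 0 := by
  rcases h1 : PySem.List.max? l (fun v => v) with _ | m1
  · have hl : l = [] := (PySem.List.max?_eq_none_iff _ _).mp h1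
    subst hl
    have hl' : l' = [] := hp.nil_eq.symm
    subst hl'
    rfl
  rcases h2 : PySem.List.max? l' (fun v => v) with _ | m2
  · have hl' : l' = [] := (PySem.List.max?_eq_none_iff _ _).mp h2
    subst hl'
    have hl : l = [] := hp.eq_nil
    subst hl
    cases h1
  simp only [Option.getD_some]
  exact le_antisymm (PySem.List.max?_isMax h2 _ (hp.mem_iff.mp (PySem.List.max?_mem h1)))
    (PySem.List.max?_isMax h1 _ (hp.symm.mem_iff.mp (PySem.List.max?_mem h2)))

-- ---- facts about set(…) as a fold of add ----

theorem pv_add_filter (t : List String) (acc : PySem.Set String) (x : String) (hx : x ∈ acc) :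
    t.foldl PySem.Set.add acc = (t.filter (fun y => y != x)).foldl PySem.Set.add acc := by
  induction t generalizing acc with
  | nil => rfl
  | cons y t ih =>
    by_cases hyx : y = x
    · subst hyx
      have hc : PySem.Set.add acc y = acc := by
        simp only [PySem.Set.add]
        rw [if_pos]
        simpa using (PySem.Set.contains_iff acc y).mpr hx
      simp [List.foldl_cons, hc, ih acc hx]
    · have : x ∈ PySem.Set.add acc y := (PySem.Set.mem_add _ _ _).mpr (Or.inl hx)
      simp [List.foldl_cons, hyx, ih _ this]

theorem pv_add_cons (l : List String) (h : String) (acc : PySem.Set String) (hnl : h ∉ l) :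
    l.foldl PySem.Set.add (h :: acc) = h :: l.foldl PySem.Set.add acc := by
  induction l generalizing acc with
  | nil => rfl
  | cons y t ih =>
    have hyh : y ≠ h := fun e => hnl (e ▸ List.mem_cons_self)
    have hstep : PySem.Set.add (h :: acc) y = h :: PySem.Set.add acc y := by
      by_cases hm : y ∈ acc <;>
        simp [PySem.Set.add, PySem.Set.contains, hyh, hm]
    rw [List.foldl_cons, hstep, ih _ (fun hm => hnl (List.mem_cons_of_mem _ hm)), List.foldl_cons]

theorem pv_ofList_cons (h : String) (t : List String) :
    PySem.Set.ofList (h :: t) = h :: PySem.Set.ofList (t.filter (fun y => y != h)) := by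
  have h1 : PySem.Set.ofList (h :: t) = t.foldl PySem.Set.add [h] := by
    rw [PySem.Set.ofList_eq_foldl]; rfl
  have h2 : h ∉ t.filter (fun y => y != h) := by simp
  rw [h1, pv_add_filter t [h] h List.mem_cons_self, pv_add_cons _ h [] h2,
    ← PySem.Set.ofList_eq_foldl]

theorem pv_ofList_sublist (l : List String) : (PySem.Set.ofList l).Sublist l := by
  suffices hgen : ∀ (l : List String) (acc : PySem.Set String),
      ∃ t, l.foldl PySem.Set.add acc = acc ++ t ∧ t.Sublist l by
    rcases hgen l [] with ⟨t, he, hs⟩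
    rw [PySem.Set.ofList_eq_foldl, he]; simpa using hs
  intro l
  induction l with
  | nil => intro acc; exact ⟨[], by simp⟩
  | cons h t ih =>
    intro acc
    by_cases hc : PySem.Set.contains acc h
    · rcases ih (PySem.Set.add acc h) with ⟨u, he, hs⟩
      refine ⟨u, ?_, hs.cons h⟩
      rw [List.foldl_cons, he]
      have hm : h ∈ acc := (PySem.Set.contains_iff acc h).mp hc
      simp [PySem.Set.add, hm]
    · rcases ih (PySem.Set.add acc h) with ⟨u, he, hs⟩
      refine ⟨h :: u, ?_, hs.cons₂ h⟩
      rw [List.foldl_cons, he]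
      have hm : h ∉ acc := fun m => hc ((PySem.Set.contains_iff acc h).mpr m)
      simp [PySem.Set.add, hm]

-- ---- the run-length scan over a sorted list is Counter as sorted items ----

theorem pvStep_concat (l : List (String × Int)) (k : String) (c : Int) (h : String) :
    pvStep (l ++ [(k, c)]) h
      = if k == h then l ++ [(k, c + 1)] else (l ++ [(k, c)]) ++ [(h, 1)] := by
  unfold pvStep
  rw [List.getLast?_concat, List.dropLast_concat]

theorem pvStep_append (acc r : List (String × Int)) (h : String) (hr : r ≠ []) :
    pvStep (acc ++ r) h = acc ++ pvStep r h := by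
  obtain ⟨l, kc, rfl⟩ : ∃ l kc, r = l ++ [kc] :=
    ⟨r.dropLast, r.getLast hr, (List.dropLast_append_getLast hr).symm⟩
  obtain ⟨k, c⟩ := kc
  rw [← List.append_assoc, pvStep_concat, pvStep_concat]
  by_cases hkh : k == h <;> simp [hkh]

theorem pvStep_ne_nil (r : List (String × Int)) (h : String) : pvStep r h ≠ [] := by
  unfold pvStep
  rcases r.getLast? with _ | last
  · simp
  · by_cases he : last.1 = h <;> simp [he]

theorem pv_foldl_factor (l : List String) (acc r : List (String × Int)) (hr : r ≠ []) :
    l.foldl pvStep (acc ++ r) = acc ++ l.foldl pvStep r := by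
  induction l generalizing r with
  | nil => rfl
  | cons h t ih =>
    rw [List.foldl_cons, List.foldl_cons, pvStep_append acc r h hr, ih _ (pvStep_ne_nil r h)]

theorem pv_rleF (l : List String) (k : String) (c : Int)
    (hs : l.Pairwise (· ≤ ·)) (hk : ∀ x ∈ l, k ≤ x) :
    l.foldl pvStep [(k, c)]
      = (k, c + (l.count k : Int))
        :: (PySem.Set.ofList (l.filter (fun y => y != k))).map (fun x => (x, (l.count x : Int))) := by
  induction l generalizing k c with
  | nil => simp
  | cons h t ih =>
    rcases List.pairwise_cons.mp hs with ⟨hhle, hts⟩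
    by_cases hhk : h = k
    · subst hhk
      have hstep : pvStep [(h, c)] h = [(h, c + 1)] := by simp [pvStep]
      rw [List.foldl_cons, hstep, ih h (c + 1) hts hhle]
      rw [List.cons_eq_cons]
      refine ⟨?_, ?_⟩
      · simp only [Prod.ext_iff, List.count_cons_self]
        exact ⟨trivial, by push_cast; ring⟩
      · have hf : (h :: t).filter (fun y => y != h) = t.filter (fun y => y != h) := by simp
        rw [hf]
        apply List.map_congr_left
        intro x hx
        have hxh : x ≠ h := by
          have := (PySem.Set.mem_ofList _ _).mp hx
          simpa using (List.mem_filter.mp this).2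
        simp [Ne.symm hxh]
    · have hkh : k < h := lt_of_le_of_ne (hk h List.mem_cons_self) (Ne.symm hhk)
      have hknt : k ∉ t := fun hm => absurd (hhle k hm) (not_le.mpr hkh)
      have hk0 : k ∉ h :: t := by
        intro hm
        rcases List.mem_cons.mp hm with e | hm'
        · exact hhk e.symm
        · exact hknt hm'
      have hstep : pvStep [(k, c)] h = [(k, c)] ++ [(h, 1)] := by
        simp [pvStep, Ne.symm hhk]
      rw [List.foldl_cons, hstep, pv_foldl_factor t [(k, c)] [(h, 1)] (by simp),
        ih h 1 hts hhle]
      have hf : (h :: t).filter (fun y => y != k) = h :: t := by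
        apply List.filter_eq_self.mpr
        intro a ha
        simp only [bne_iff_ne, ne_eq]
        exact fun e => hk0 (e ▸ ha)
      rw [hf, pv_ofList_cons h t]
      simp only [List.map_cons, List.cons_append, List.nil_append]
      rw [List.cons_eq_cons]
      refine ⟨?_, ?_⟩
      · simp [List.count_eq_zero.mpr hk0]
      rw [List.cons_eq_cons]
      refine ⟨?_, ?_⟩
      · simp only [Prod.ext_iff, List.count_cons_self]
        exact ⟨trivial, by push_cast; ring⟩
      · apply List.map_congr_left
        intro x hx
        have hxh : x ≠ h := by
          have := (PySem.Set.mem_ofList _ _).mp hx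
          simpa using (List.mem_filter.mp this).2
        simp [Ne.symm hxh]

theorem pv_runs (s : List String) (hs : s.Pairwise (· ≤ ·)) :
    s.foldl pvStep [] = (PySem.Set.ofList s).map (fun k => (k, (s.count k : Int))) := by
  cases s with
  | nil => rfl
  | cons h t =>
    rcases List.pairwise_cons.mp hs with ⟨hhle, hts⟩
    have hstep : pvStep [] h = [(h, 1)] := by simp [pvStep]
    rw [List.foldl_cons, hstep, pv_rleF t h 1 hts hhle, pv_ofList_cons h t]
    rw [List.map_cons, List.cons_eq_cons]
    refine ⟨?_, ?_⟩
    · simp only [Prod.ext_iff, List.count_cons_self]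
      exact ⟨trivial, by push_cast; ring⟩
    · apply List.map_congr_left
      intro x hx
      have hxh : x ≠ h := by
        have := (PySem.Set.mem_ofList _ _).mp hx
        simpa using (List.mem_filter.mp this).2
      simp [Ne.symm hxh]

-- ===== VERDICT (by name: the statement is the Claim_ definition above) =====
theorem busiest_time_spec : Claim_equal_busiest_time := by
  intro schedule _ _
  unfold Spec_busiest_time
  simp only [busiest_time, busiest_time_alt]
  rw [pv_counts_eq]
  set hours := schedule.map (fun kv => pvHour kv.1) with hh
  set s := PySem.List.sorted hours (fun x => x) false with hsdef
  have hsp : s.Pairwise (· ≤ ·) := by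
    have := PySem.List.sorted_pairwise hours (fun x => x)
    simpa [hsdef] using this
  have hperm : s.Perm hours := PySem.List.sorted_perm hours (fun x => x) false
  have hcount : ∀ x, s.count x = hours.count x := fun x => hperm.count_eq x
  rw [pv_runs s hsp]
  -- the two distinct-key lists are permutations of each other
  have hsetperm : (PySem.Set.ofList s).Perm (PySem.Set.ofList hours) := by
    rw [List.perm_ext_iff_of_nodup (PySem.Set.nodup_ofList _) (PySem.Set.nodup_ofList _)]
    intro a
    rw [PySem.Set.mem_ofList, PySem.Set.mem_ofList, hperm.mem_iff]
  -- A's values list and B's run-count list are permutations, so max agrees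
  have hvals : (PySem.Dict.counter hours).values
      = (PySem.Set.ofList hours).map (fun k => (hours.count k : Int)) := by
    show (PySem.Dict.counter hours).items.map Prod.snd = _
    rw [PySem.Dict.items_counter]
    simp [List.map_map, Function.comp]
  have hruns_snd : ((PySem.Set.ofList s).map (fun k => (k, (s.count k : Int)))).map
      (fun p => p.2) = (PySem.Set.ofList s).map (fun k => (hours.count k : Int)) := by
    rw [List.map_map]
    exact List.map_congr_left (fun x _ => by simp [hcount x])
  rw [hvals, PySem.Dict.items_counter, hruns_snd]
  have hmaxeq : (PySem.List.max? ((PySem.Set.ofList s).map (fun k => (hours.count k : Int)))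
        (fun v => v)).getD 0
      = (PySem.List.max? ((PySem.Set.ofList hours).map (fun k => (hours.count k : Int)))
        (fun v => v)).getD 0 :=
    pv_max_perm _ _ (hsetperm.map _)
  rw [hmaxeq]
  set m := (PySem.List.max? ((PySem.Set.ofList hours).map (fun k => (hours.count k : Int)))
    (fun v => v)).getD 0 with hm
  -- both filtered key lists, as map-fst of filtered pair lists
  have hfilA : (((PySem.Set.ofList hours).map (fun k => (k, (hours.count k : Int)))).filter
        (fun p => p.2 == m)).map (fun p => p.1)
      = (PySem.Set.ofList hours).filter (fun k => ((hours.count k : Int)) == m) := by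
    rw [List.filter_map, List.map_map]
    simp [Function.comp_def]
  have hfilB : (((PySem.Set.ofList s).map (fun k => (k, (s.count k : Int)))).filter
        (fun p => p.2 == m)).map (fun p => p.1)
      = (PySem.Set.ofList s).filter (fun k => ((hours.count k : Int)) == m) := by
    rw [List.filter_map, List.map_map]
    simp only [Function.comp_def, List.map_id']
    apply List.filter_congr
    intro x _
    rw [hcount x]
  rw [hfilA, hfilB]
  -- B's filtered list is a strictly increasing rearrangement of A's, so it IS A's sorted result
  have hpw : ((PySem.Set.ofList s).filter (fun k => ((hours.count k : Int)) == m)).Pairwise (· < ·) := by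
    have hle : (PySem.Set.ofList s).Pairwise (· ≤ ·) :=
      List.Pairwise.sublist (pv_ofList_sublist s) hsp
    have hne : (PySem.Set.ofList s).Pairwise (· ≠ ·) := PySem.Set.nodup_ofList s
    have hlt : (PySem.Set.ofList s).Pairwise (· < ·) :=
      (hle.and hne).imp (fun h => lt_of_le_of_ne h.1 h.2)
    exact hlt.filter _
  have hfperm : ((PySem.Set.ofList s).filter (fun k => ((hours.count k : Int)) == m)).Perm
      ((PySem.Set.ofList hours).filter (fun k => ((hours.count k : Int)) == m)) :=
    hsetperm.filter _
  exact PySem.List.sorted_eq_of_perm_of_pairwise_lt _ _ (fun x => x) hfperm hpw
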